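-- pv_equiv track=rewrite | github.com/mysticflounder/sqlforge | sqlforge/tokenizer.py | _scan_number
-- ===== SOURCE A (Python) =====
-- def _scan_number(sql: str, start: int) -> tuple[str, int]:
--     """Scan a numeric literal starting at position start. Returns (value, new_index)."""
--     i = start
--     n = len(sql)
--     has_dot = False
--     buf: list[str] = []
--
--     while i < n:
--         ch = sql[i]
--         if ch.isdigit():
--             buf.append(ch)
--             i += 1
--         elif ch == "." and not has_dot:
--             has_dot = True
--             buf.append(ch)
--             i += 1
--         else:
--             break
--
--     return "".join(buf), i
-- ===== SOURCE B (Python) =====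
-- def _scan_number(sql: str, start: int) -> tuple[str, int]:
--     """Scan a numeric literal starting at position start. Returns (value, new_index)."""
--     n = len(sql)
--     i = start
--     while i < n and sql[i].isdigit():
--         i += 1
--     if i < n and sql[i] == ".":
--         i += 1
--         while i < n and sql[i].isdigit():
--             i += 1
--     return sql[start:i], i
-- ===== Notes on version B (the rewrite author's own statement) =====
-- stated objective: simpler
-- what changed: A's single while-loop with a has_dot flag and a character buffer is replaced by two plain digit runs separated by one optional dot, returning the slice sql[start:i] instead of joining a buffer.
-- intended difference: For -len(sql) <= start < 0 with the suffix sql[start:] consisting only of digits with at most one dot, A's scan runs off the negative indices into index 0 by Python wraparound and returns text that re-reads characters twice; B returns the literal slice sql[start:i], the intended value, since the wrapped re-read is an accident of negative indexing. — e.g. on _scan_number("5", -1): A returns ("55", 1), B returns ("5", 1)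
import Mathlib
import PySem

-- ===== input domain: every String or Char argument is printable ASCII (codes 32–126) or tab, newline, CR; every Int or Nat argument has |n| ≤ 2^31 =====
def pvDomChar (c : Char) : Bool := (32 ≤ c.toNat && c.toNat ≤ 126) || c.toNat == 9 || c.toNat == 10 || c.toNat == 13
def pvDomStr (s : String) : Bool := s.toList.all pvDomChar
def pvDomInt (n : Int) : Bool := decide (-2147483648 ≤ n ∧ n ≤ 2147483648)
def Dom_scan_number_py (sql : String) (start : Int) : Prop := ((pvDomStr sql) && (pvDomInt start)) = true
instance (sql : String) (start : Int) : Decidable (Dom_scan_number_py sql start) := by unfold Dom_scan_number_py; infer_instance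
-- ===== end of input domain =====

-- B replaces A's character buffer and has_dot flag by two plain digit runs with one
-- optional dot between them, returning the slice sql[start:i] (objective: simpler).

-- ===== PORT A =====
-- while-loop of A as fuel recursion; fuel = n - i, enough for every iteration.
def scanALoop (cs : List Char) (n : Int) : Nat → Int → Bool → List Char → List Char × Int
  | 0, i, _, buf => (buf, i)
  | fuel+1, i, hasDot, buf =>
    if i < n then
      match PySem.List.pyGet? cs i with
      | some ch =>
        if PySem.Chars.isdigit ch then scanALoop cs n fuel (i+1) hasDot (buf ++ [ch])
        else if ch == '.' && !hasDot then scanALoop cs n fuel (i+1) true (buf ++ [ch])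
        else (buf, i)
      | none => (buf, i)    -- Python raises IndexError here: outside Pre_
    else (buf, i)

def scan_number_py (sql : String) (start : Int) : String × Int :=
  let n : Int := PySem.Str.len sql
  let r := scanALoop sql.toList n (n - start).toNat start false []
  (String.ofList r.1, r.2)

-- ===== PORT B =====
-- one digit run: advance i while i < n and sql[i].isdigit()
def skipDigits (cs : List Char) (n : Int) : Nat → Int → Int
  | 0, i => i
  | fuel+1, i =>
    if i < n then
      match PySem.List.pyGet? cs i with
      | some ch => if PySem.Chars.isdigit ch then skipDigits cs n fuel (i+1) else i
      | none => i    -- Python raises IndexError here: outside Pre_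
    else i

def scan_number_py_alt (sql : String) (start : Int) : String × Int :=
  let cs := sql.toList
  let n : Int := PySem.Str.len sql
  let i1 := skipDigits cs n (n - start).toNat start
  let i2 :=
    if i1 < n then
      match PySem.List.pyGet? cs i1 with
      | some ch => if ch == '.' then skipDigits cs n (n - (i1+1)).toNat (i1+1) else i1
      | none => i1
    else i1
  (String.ofList (PySem.List.slice cs (some start) (some i2)), i2)

-- ===== PRECONDITION & SPEC =====
-- Pre_ excludes exactly the inputs where A raises IndexError: start < -len(sql)
-- (and any negative start when sql is empty); B raises there as well.
def Pre_scan_number_py (sql : String) (start : Int) : Prop :=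
  -(sql.toList.length : Int) ≤ start
instance (sql : String) (start : Int) : Decidable (Pre_scan_number_py sql start) := by
  unfold Pre_scan_number_py; infer_instance

def pvWitness_scan_number_py : String × Int := ("12.5x", 0)

def pvNumLike (c : Char) : Bool := PySem.Chars.isdigit c || c == '.'

-- For -len ≤ start < 0 with the suffix sql[start:] consisting of digits with at most one
-- dot, A's scan runs off the negative indices into position 0 (Python wraparound) and
-- returns a value that re-reads characters twice, while B returns the intended literal
-- sql[start:i]; B's value is the intended one since the wrapped re-read is an accident
-- of Python's negative indexing.
def D_scan_number_py (sql : String) (start : Int) : Prop :=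
  start < 0 ∧ -(sql.toList.length : Int) ≤ start ∧
    (sql.toList.drop ((sql.toList.length : Int) + start).toNat).all pvNumLike = true ∧
    (sql.toList.drop ((sql.toList.length : Int) + start).toNat).count '.' ≤ 1
instance (sql : String) (start : Int) : Decidable (D_scan_number_py sql start) := by
  unfold D_scan_number_py; infer_instance

def Spec_scan_number_py (sql : String) (start : Int) (out : String × Int) : Prop :=
  ¬ D_scan_number_py sql start → out = scan_number_py_alt sql start
instance (sql : String) (start : Int) (out : String × Int) :
    Decidable (Spec_scan_number_py sql start out) := by
  unfold Spec_scan_number_py; infer_instance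

def pvDiffWitness_scan_number_py : String × Int := ("5", -1)
def pvDiffWitnessOut_scan_number_py : (String × Int) × (String × Int) := (("55", 1), ("5", 1))

-- ===== CLAIM (what is proved, stated in full; the proofs are below) =====
def Claim_unchanged_scan_number_py : Prop := ∀ (sql : String) (start : Int), Dom_scan_number_py sql start → Pre_scan_number_py sql start → Spec_scan_number_py sql start (scan_number_py sql start)
def Claim_changed_scan_number_py : Prop := Dom_scan_number_py (pvDiffWitness_scan_number_py.1) (pvDiffWitness_scan_number_py.2) ∧ Pre_scan_number_py (pvDiffWitness_scan_number_py.1) (pvDiffWitness_scan_number_py.2) ∧ D_scan_number_py (pvDiffWitness_scan_number_py.1) (pvDiffWitness_scan_number_py.2) ∧ scan_number_py (pvDiffWitness_scan_number_py.1) (pvDiffWitness_scan_number_py.2) = pvDiffWitnessOut_scan_number_py.1 ∧ scan_number_py_alt (pvDiffWitness_scan_number_py.1) (pvDiffWitness_scan_number_py.2) = pvDiffWitnessOut_scan_number_py.2 ∧ pvDiffWitnessOut_scan_number_py.1 ≠ pvDiffWitnessOut_scan_number_py.2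

def Claim_exact_scan_number_py : Prop := ∀ (sql : String) (start : Int), Dom_scan_number_py sql start → Pre_scan_number_py sql start → D_scan_number_py sql start → scan_number_py sql start ≠ scan_number_py_alt sql start

-- ===== LEMMAS AND PROOFS =====

lemma pvSkip_ge (cs : List Char) (fuel : Nat) (i : Int) (h : (cs.length : Int) ≤ i) :
    skipDigits cs (cs.length : Int) fuel i = i := by
  cases fuel <;> simp [skipDigits, not_lt.mpr h]

lemma pvScanA_ge (cs : List Char) (fuel : Nat) (i : Int) (hasDot : Bool) (buf : List Char)
    (h : (cs.length : Int) ≤ i) :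
    scanALoop cs (cs.length : Int) fuel i hasDot buf = (buf, i) := by
  cases fuel <;> simp [scanALoop, not_lt.mpr h]

lemma pvGet_shift (cs : List Char) (i : Int) (h1 : -(cs.length : Int) ≤ i) (h2 : i < 0) :
    PySem.List.pyGet? cs i = PySem.List.pyGet? cs ((cs.length : Int) + i) := by
  have hk : i = -((-i).toNat : Int) := by omega
  rw [hk, PySem.List.pyGet?_neg_natCast cs (-i).toNat (by omega) (by omega)]
  have h3 : (cs.length : Int) + -(((-i).toNat : Nat) : Int) = ((cs.length - (-i).toNat : Nat) : Int) := by
    omega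
  rw [h3, PySem.List.pyGet?_natCast]

lemma pvTakeOfPrefix {l1 l2 : List Char} (h : l1 <+: l2) : l2.take l1.length = l1 :=
  (List.prefix_iff_eq_take.mp h).symm

lemma pvDropAt (cs : List Char) (i : Nat) :
    cs.drop (i + ((cs.drop i).takeWhile PySem.Chars.isdigit).length)
      = (cs.drop i).dropWhile PySem.Chars.isdigit := by
  have h := List.takeWhile_append_dropWhile (p := PySem.Chars.isdigit) (l := cs.drop i)
  calc cs.drop (i + ((cs.drop i).takeWhile PySem.Chars.isdigit).length)
      = (cs.drop i).drop ((cs.drop i).takeWhile PySem.Chars.isdigit).length := by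
        rw [List.drop_drop]
    _ = (((cs.drop i).takeWhile PySem.Chars.isdigit) ++
          ((cs.drop i).dropWhile PySem.Chars.isdigit)).drop
          ((cs.drop i).takeWhile PySem.Chars.isdigit).length := by rw [h]
    _ = (cs.drop i).dropWhile PySem.Chars.isdigit := List.drop_left

lemma pvSkip_closed (cs : List Char) : ∀ (fuel i : Nat), cs.length ≤ i + fuel →
    skipDigits cs (cs.length : Int) fuel (i : Int)
      = ((i + ((cs.drop i).takeWhile PySem.Chars.isdigit).length : Nat) : Int) := by
  intro fuel
  induction fuel with
  | zero =>
    intro i h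
    have hd : cs.drop i = [] := List.drop_eq_nil_of_le (by omega)
    simp [skipDigits, hd]
  | succ fuel ih =>
    intro i h
    by_cases hi : i < cs.length
    · have hg : ((i : Int) < (cs.length : Int)) := by exact_mod_cast hi
      have hget : PySem.List.pyGet? cs (i : Int) = some cs[i] := by
        simp [List.getElem?_eq_getElem hi]
      have hdrop : cs.drop i = cs[i] :: cs.drop (i + 1) := List.drop_eq_getElem_cons hi
      by_cases hdig : PySem.Chars.isdigit cs[i]
      · rw [skipDigits]
        simp only [hg, if_true, hget, hdig]
        have : ((i : Int) + 1) = ((i + 1 : Nat) : Int) := by push_cast; ring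
        rw [this, ih (i + 1) (by omega)]
        rw [hdrop, List.takeWhile_cons, if_pos hdig]
        simp only [List.length_cons]
        push_cast
        ring
      · rw [skipDigits]
        simp only [hg, if_true, hget, hdig]
        rw [hdrop, List.takeWhile_cons, if_neg hdig]
        simp
    · have hd : cs.drop i = [] := List.drop_eq_nil_of_le (by omega)
      rw [pvSkip_ge cs _ _ (by exact_mod_cast not_lt.mp hi)]
      simp [hd]

lemma pvScanA_true_closed (cs : List Char) : ∀ (fuel i : Nat) (buf : List Char),
    cs.length ≤ i + fuel →
    scanALoop cs (cs.length : Int) fuel (i : Int) true buf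
      = (buf ++ (cs.drop i).takeWhile PySem.Chars.isdigit,
         ((i + ((cs.drop i).takeWhile PySem.Chars.isdigit).length : Nat) : Int)) := by
  intro fuel
  induction fuel with
  | zero =>
    intro i buf h
    have hd : cs.drop i = [] := List.drop_eq_nil_of_le (by omega)
    simp [scanALoop, hd]
  | succ fuel ih =>
    intro i buf h
    by_cases hi : i < cs.length
    · have hg : ((i : Int) < (cs.length : Int)) := by exact_mod_cast hi
      have hget : PySem.List.pyGet? cs (i : Int) = some cs[i] := by
        simp [List.getElem?_eq_getElem hi]
      have hdrop : cs.drop i = cs[i] :: cs.drop (i + 1) := List.drop_eq_getElem_cons hi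
      by_cases hdig : PySem.Chars.isdigit cs[i]
      · rw [scanALoop]
        simp only [hg, if_true, hget, hdig]
        have hc : ((i : Int) + 1) = ((i + 1 : Nat) : Int) := by push_cast; ring
        rw [hc, ih (i + 1) (buf ++ [cs[i]]) (by omega)]
        rw [hdrop, List.takeWhile_cons, if_pos hdig]
        rw [Prod.mk.injEq]
        refine ⟨by simp, ?_⟩
        simp only [List.length_cons]
        push_cast
        ring
      · rw [scanALoop]
        simp only [hg, if_true, hget, hdig]
        rw [hdrop, List.takeWhile_cons, if_neg hdig]
        simp
    · have hd : cs.drop i = [] := List.drop_eq_nil_of_le (by omega)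
      rw [pvScanA_ge cs _ _ _ _ (by exact_mod_cast not_lt.mp hi)]
      simp [hd]

lemma pvScanA_false_closed (cs : List Char) : ∀ (fuel i : Nat) (buf : List Char),
    cs.length ≤ i + fuel →
    scanALoop cs (cs.length : Int) fuel (i : Int) false buf
      = (if ((cs.drop i).dropWhile PySem.Chars.isdigit).head? = some '.' then
          (buf ++ (cs.drop i).takeWhile PySem.Chars.isdigit ++
             '.' :: ((cs.drop i).dropWhile PySem.Chars.isdigit).tail.takeWhile PySem.Chars.isdigit,
           ((i + ((cs.drop i).takeWhile PySem.Chars.isdigit).length + 1 +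
              (((cs.drop i).dropWhile PySem.Chars.isdigit).tail.takeWhile PySem.Chars.isdigit).length : Nat) : Int))
         else
          (buf ++ (cs.drop i).takeWhile PySem.Chars.isdigit,
           ((i + ((cs.drop i).takeWhile PySem.Chars.isdigit).length : Nat) : Int))) := by
  intro fuel
  induction fuel with
  | zero =>
    intro i buf h
    have hd : cs.drop i = [] := List.drop_eq_nil_of_le (by omega)
    simp [scanALoop, hd]
  | succ fuel ih =>
    intro i buf h
    by_cases hi : i < cs.length
    · have hg : ((i : Int) < (cs.length : Int)) := by exact_mod_cast hi
      have hget : PySem.List.pyGet? cs (i : Int) = some cs[i] := by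
        simp [List.getElem?_eq_getElem hi]
      have hdrop : cs.drop i = cs[i] :: cs.drop (i + 1) := List.drop_eq_getElem_cons hi
      have hc : ((i : Int) + 1) = ((i + 1 : Nat) : Int) := by push_cast; ring
      by_cases hdig : PySem.Chars.isdigit cs[i]
      · rw [scanALoop]
        simp only [hg, if_true, hget, hdig]
        rw [hc, ih (i + 1) (buf ++ [cs[i]]) (by omega)]
        rw [hdrop, List.takeWhile_cons, if_pos hdig, List.dropWhile_cons_of_pos hdig]
        split_ifs with hhd
        · rw [Prod.mk.injEq]
          refine ⟨by simp, ?_⟩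
          simp only [List.length_cons]
          push_cast; ring
        · rw [Prod.mk.injEq]
          refine ⟨by simp, ?_⟩
          simp only [List.length_cons]
          push_cast; ring
      · by_cases hdot : cs[i] = '.'
        · rw [scanALoop]
          have hbeq : (cs[i] == '.') = true := beq_iff_eq.mpr hdot
          simp only [hg, if_true, hget, hdig, hbeq, Bool.not_false, Bool.and_true, if_true]
          rw [hc, pvScanA_true_closed cs fuel (i + 1) (buf ++ [cs[i]]) (by omega)]
          rw [hdrop, List.takeWhile_cons, if_neg hdig, List.dropWhile_cons_of_neg hdig]
          rw [if_pos (show (cs[i] :: cs.drop (i + 1)).head? = some '.' by simp [hdot])]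
          rw [Prod.mk.injEq]
          refine ⟨by simp [hdot], ?_⟩
          simp only [List.tail_cons, List.length_nil]
          push_cast; ring
        · rw [scanALoop]
          have hbeq : (cs[i] == '.') = false := by simp [hdot]
          simp only [hg, if_true, hget, hdig, hbeq, Bool.false_and]
          rw [hdrop, List.takeWhile_cons, if_neg hdig, List.dropWhile_cons_of_neg hdig]
          rw [if_neg (show ¬ ((cs[i] :: cs.drop (i + 1)).head? = some '.') by
            simp only [List.head?_cons, Option.some.injEq]; exact hdot)]
          simp
    · have hd : cs.drop i = [] := List.drop_eq_nil_of_le (by omega)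
      rw [pvScanA_ge cs _ _ _ _ (by exact_mod_cast not_lt.mp hi)]
      simp [hd]

lemma pvSkip_shift (cs : List Char) : ∀ (fuel : Nat) (i : Int),
    -(cs.length : Int) ≤ i → i < 0 →
    skipDigits cs (cs.length : Int) fuel ((cs.length : Int) + i) < (cs.length : Int) →
    skipDigits cs (cs.length : Int) fuel i
      = skipDigits cs (cs.length : Int) fuel ((cs.length : Int) + i) - (cs.length : Int) := by
  intro fuel
  induction fuel with
  | zero => intro i h1 h2 _; simp [skipDigits]
  | succ fuel ih =>
    intro i h1 h2 hstop
    have hgL : i < (cs.length : Int) := by omega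
    have hgR : (cs.length : Int) + i < (cs.length : Int) := by omega
    have hget := pvGet_shift cs i h1 h2
    rw [skipDigits] at hstop ⊢
    conv_rhs => rw [skipDigits]
    simp only [hgL, hgR, if_true, hget] at hstop ⊢
    cases hv : PySem.List.pyGet? cs ((cs.length : Int) + i) with
    | none => simp
    | some ch =>
      simp only [hv] at hstop ⊢
      by_cases hdig : PySem.Chars.isdigit ch
      · simp only [hdig, if_true] at hstop ⊢
        by_cases hz : i + 1 = 0
        · exfalso
          rw [show (cs.length : Int) + i + 1 = (cs.length : Int) by omega] at hstop
          rw [pvSkip_ge cs fuel _ (le_refl _)] at hstop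
          omega
        · rw [show (cs.length : Int) + i + 1 = (cs.length : Int) + (i + 1) by ring] at hstop ⊢
          exact ih (i + 1) (by omega) (by omega) hstop
      · simp [hdig]

lemma pvScanA_shift (cs : List Char) : ∀ (fuel : Nat) (i : Int) (hasDot : Bool) (buf : List Char),
    -(cs.length : Int) ≤ i → i < 0 →
    (scanALoop cs (cs.length : Int) fuel ((cs.length : Int) + i) hasDot buf).2 < (cs.length : Int) →
    scanALoop cs (cs.length : Int) fuel i hasDot buf
      = ((scanALoop cs (cs.length : Int) fuel ((cs.length : Int) + i) hasDot buf).1,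
         (scanALoop cs (cs.length : Int) fuel ((cs.length : Int) + i) hasDot buf).2 - (cs.length : Int)) := by
  intro fuel
  induction fuel with
  | zero => intro i hasDot buf h1 h2 _; simp [scanALoop]
  | succ fuel ih =>
    intro i hasDot buf h1 h2 hstop
    have hgL : i < (cs.length : Int) := by omega
    have hgR : (cs.length : Int) + i < (cs.length : Int) := by omega
    have hget := pvGet_shift cs i h1 h2
    rw [scanALoop] at hstop ⊢
    conv_rhs => rw [scanALoop]
    simp only [hgL, hgR, if_true, hget] at hstop ⊢
    cases hv : PySem.List.pyGet? cs ((cs.length : Int) + i) with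
    | none => simp
    | some ch =>
      simp only [hv] at hstop ⊢
      have hrec : ∀ hd' buf',
          (scanALoop cs (cs.length : Int) fuel ((cs.length : Int) + i + 1) hd' buf').2 < (cs.length : Int) →
          scanALoop cs (cs.length : Int) fuel (i + 1) hd' buf'
            = ((scanALoop cs (cs.length : Int) fuel ((cs.length : Int) + i + 1) hd' buf').1,
               (scanALoop cs (cs.length : Int) fuel ((cs.length : Int) + i + 1) hd' buf').2 - (cs.length : Int)) := by
        intro hd' buf' hst
        by_cases hz : i + 1 = 0
        · exfalso
          rw [show (cs.length : Int) + i + 1 = (cs.length : Int) by omega] at hst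
          rw [pvScanA_ge cs fuel _ _ _ (le_refl _)] at hst
          simp at hst
        · rw [show (cs.length : Int) + i + 1 = (cs.length : Int) + (i + 1) by ring] at hst ⊢
          exact ih (i + 1) hd' buf' (by omega) (by omega) hst
      by_cases hdig : PySem.Chars.isdigit ch
      · simp only [hdig, if_true] at hstop ⊢
        exact hrec hasDot (buf ++ [ch]) hstop
      · simp only [hdig] at hstop ⊢
        by_cases hdot : (ch == '.' && !hasDot) = true
        · simp only [hdot, if_true] at hstop ⊢
          exact hrec true (buf ++ [ch]) hstop
        · simp only [hdot] at hstop ⊢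
          simp


lemma pvLen (sql : String) : PySem.Str.len sql = (sql.toList.length : Int) := by
  simp [PySem.Str.len]

lemma pvSum (l : List Char) :
    (l.takeWhile PySem.Chars.isdigit).length + (l.dropWhile PySem.Chars.isdigit).length
      = l.length := by
  rw [← List.length_append, List.takeWhile_append_dropWhile]

lemma pvDropCons (l : List Char) (h : (l.dropWhile PySem.Chars.isdigit).head? = some '.') :
    l.dropWhile PySem.Chars.isdigit = '.' :: (l.dropWhile PySem.Chars.isdigit).tail := by
  cases hR : l.dropWhile PySem.Chars.isdigit with
  | nil => rw [hR] at h; simp at h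
  | cons a as => rw [hR] at h; simp only [List.head?_cons, Option.some.injEq] at h; simp [h]

lemma pvTakeRun (l : List Char) :
    l.take (l.takeWhile PySem.Chars.isdigit).length = l.takeWhile PySem.Chars.isdigit :=
  pvTakeOfPrefix (List.takeWhile_prefix _)

lemma pvTakeDot (l : List Char) (h : (l.dropWhile PySem.Chars.isdigit).head? = some '.') :
    l.take ((l.takeWhile PySem.Chars.isdigit).length + 1 +
            ((l.dropWhile PySem.Chars.isdigit).tail.takeWhile PySem.Chars.isdigit).length)
      = l.takeWhile PySem.Chars.isdigit ++
          '.' :: (l.dropWhile PySem.Chars.isdigit).tail.takeWhile PySem.Chars.isdigit := by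
  obtain ⟨u, hu⟩ := List.takeWhile_prefix
    (l := (l.dropWhile PySem.Chars.isdigit).tail) (p := PySem.Chars.isdigit)
  have hpre : (l.takeWhile PySem.Chars.isdigit ++
      '.' :: (l.dropWhile PySem.Chars.isdigit).tail.takeWhile PySem.Chars.isdigit) <+: l := by
    refine ⟨u, ?_⟩
    conv_rhs => rw [← List.takeWhile_append_dropWhile (p := PySem.Chars.isdigit) (l := l)]
    rw [List.append_assoc]
    congr 1
    rw [pvDropCons l h]
    simp [hu]
  have := pvTakeOfPrefix hpre
  rw [← this]
  congr 1
  simp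
  omega

lemma pvMemTakeWhileDigit {l : List Char} {c : Char}
    (h : c ∈ l.takeWhile PySem.Chars.isdigit) : PySem.Chars.isdigit c = true :=
  List.mem_takeWhile_imp h

lemma pvDigitsNumLike {l : List Char} (h : ∀ c ∈ l, PySem.Chars.isdigit c = true) :
    l.all pvNumLike = true :=
  List.all_eq_true.mpr fun c hc => by simp [pvNumLike, h c hc]

lemma pvDigitsNoDot {l : List Char} (h : ∀ c ∈ l, PySem.Chars.isdigit c = true) :
    l.count '.' = 0 :=
  List.count_eq_zero.mpr (fun hm => by have := h _ hm; simp [PySem.Chars.isdigit] at this)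

-- the endpoint of A's scan over sql[s:] (s in natural coordinates) stays short of the end
-- whenever the suffix is not "digits with at most one dot"
lemma pvEndLt (cs : List Char) (s : Nat) (hs : s < cs.length)
    (hnc : ¬ ((cs.drop s).all pvNumLike = true ∧ (cs.drop s).count '.' ≤ 1)) :
    (if ((cs.drop s).dropWhile PySem.Chars.isdigit).head? = some '.' then
        s + ((cs.drop s).takeWhile PySem.Chars.isdigit).length + 1 +
          (((cs.drop s).dropWhile PySem.Chars.isdigit).tail.takeWhile PySem.Chars.isdigit).length
      else s + ((cs.drop s).takeWhile PySem.Chars.isdigit).length) < cs.length := by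
  have hsum := pvSum (cs.drop s)
  have hlen : (cs.drop s).length = cs.length - s := List.length_drop
  by_contra hge
  rw [not_lt] at hge
  apply hnc
  split_ifs at hge with hh
  · -- dot branch: whole suffix is digits ++ '.' ++ digits
    have hcons := pvDropCons (cs.drop s) hh
    have hsum2 : ((cs.drop s).takeWhile PySem.Chars.isdigit).length + 1 +
        ((cs.drop s).dropWhile PySem.Chars.isdigit).tail.length = (cs.drop s).length := by
      rw [← hsum, hcons]
      simp
      omega
    have hpre := List.takeWhile_prefix
      (l := ((cs.drop s).dropWhile PySem.Chars.isdigit).tail) (p := PySem.Chars.isdigit)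
    have hlle := hpre.length_le
    have hteq : ((cs.drop s).dropWhile PySem.Chars.isdigit).tail.takeWhile PySem.Chars.isdigit
        = ((cs.drop s).dropWhile PySem.Chars.isdigit).tail :=
      hpre.eq_of_length (by omega)
    have hdecomp : cs.drop s = (cs.drop s).takeWhile PySem.Chars.isdigit ++
        '.' :: ((cs.drop s).dropWhile PySem.Chars.isdigit).tail := by
      conv_lhs => rw [← List.takeWhile_append_dropWhile (p := PySem.Chars.isdigit) (l := cs.drop s)]
      rw [← hcons]
    constructor
    · rw [hdecomp]
      rw [List.all_append]
      refine Bool.and_eq_true_iff.mpr ⟨pvDigitsNumLike (fun c hc => pvMemTakeWhileDigit hc), ?_⟩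
      rw [List.all_cons]
      refine Bool.and_eq_true_iff.mpr ⟨by decide, ?_⟩
      rw [← hteq]
      exact pvDigitsNumLike (fun c hc => pvMemTakeWhileDigit hc)
    · rw [hdecomp, List.count_append, List.count_cons]
      rw [pvDigitsNoDot (fun c hc => pvMemTakeWhileDigit hc)]
      rw [← hteq] at *
      rw [pvDigitsNoDot (fun c hc => pvMemTakeWhileDigit hc)]
      simp
  · -- no-dot branch: whole suffix is digits
    have : ((cs.drop s).dropWhile PySem.Chars.isdigit).length = 0 := by
      have hlle := (List.takeWhile_prefix
        (l := cs.drop s) (p := PySem.Chars.isdigit)).length_le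
      omega
    have hnil : (cs.drop s).dropWhile PySem.Chars.isdigit = [] := List.eq_nil_of_length_eq_zero this
    have hteq : (cs.drop s).takeWhile PySem.Chars.isdigit = cs.drop s := by
      conv_rhs => rw [← List.takeWhile_append_dropWhile (p := PySem.Chars.isdigit) (l := cs.drop s)]
      rw [hnil, List.append_nil]
    constructor
    · exact pvDigitsNumLike (fun c hc => pvMemTakeWhileDigit (hteq ▸ hc))
    · rw [pvDigitsNoDot (fun c hc => pvMemTakeWhileDigit (hteq ▸ hc))]
      omega

lemma pvSliceNat (cs : List Char) (a b : Nat) :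
    PySem.List.slice cs (some (a : Int)) (some (b : Int)) = (cs.drop a).take (b - a) :=
  PySem.List.slice_natCast cs a b

lemma pvSliceNegNeg (cs : List Char) (a b : Nat) (ha : a < cs.length) (hb : b < cs.length) :
    PySem.List.slice cs (some ((a : Int) - (cs.length : Int))) (some ((b : Int) - (cs.length : Int)))
      = (cs.drop a).take (b - a) := by
  simp only [PySem.List.slice, PySem.List.clampIdx]
  rw [if_pos (by omega : (a : Int) - (cs.length : Int) < 0)]
  rw [if_neg (by omega : ¬ ((cs.length : Int) + ((a : Int) - (cs.length : Int)) < 0))]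
  rw [if_pos (by omega : (b : Int) - (cs.length : Int) < 0)]
  rw [if_neg (by omega : ¬ ((cs.length : Int) + ((b : Int) - (cs.length : Int)) < 0))]
  have e1 : ((cs.length : Int) + ((a : Int) - (cs.length : Int))).toNat = a := by omega
  have e2 : ((cs.length : Int) + ((b : Int) - (cs.length : Int))).toNat = b := by omega
  rw [e1, e2]

lemma pvGetRun (cs : List Char) (s : Nat) :
    PySem.List.pyGet? cs ((s + ((cs.drop s).takeWhile PySem.Chars.isdigit).length : Nat) : Int)
      = ((cs.drop s).dropWhile PySem.Chars.isdigit).head? := by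
  rw [PySem.List.pyGet?_natCast, ← List.head?_drop, pvDropAt]

lemma pvDropDot (cs : List Char) (s : Nat) :
    cs.drop (s + ((cs.drop s).takeWhile PySem.Chars.isdigit).length + 1)
      = ((cs.drop s).dropWhile PySem.Chars.isdigit).tail := by
  rw [← List.tail_drop, pvDropAt]

-- main equivalence, nonnegative start
lemma pvMain_nonneg (sql : String) (start : Int) (h0 : 0 ≤ start) :
    scan_number_py sql start = scan_number_py_alt sql start := by
  simp only [scan_number_py, scan_number_py_alt, pvLen]
  set cs := sql.toList with hcs
  set s : Nat := start.toNat with hsdef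
  have hstart : start = (s : Int) := by omega
  rw [hstart]
  have hfuel : cs.length ≤ s + ((cs.length : Int) - (s : Int)).toNat := by omega
  rw [pvScanA_false_closed cs _ s [] hfuel, pvSkip_closed cs _ s hfuel]
  have hsum := pvSum (cs.drop s)
  have hlen : (cs.drop s).length = cs.length - s := List.length_drop
  rcases hrh : ((cs.drop s).dropWhile PySem.Chars.isdigit).head? with _ | ch
  · -- run reaches the end of the string (or s is past the end): no dot test fires
    have hnil : (cs.drop s).dropWhile PySem.Chars.isdigit = [] := by
      cases hR : (cs.drop s).dropWhile PySem.Chars.isdigit with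
      | nil => rfl
      | cons a as => rw [hR] at hrh; simp at hrh
    have hz : ((cs.drop s).dropWhile PySem.Chars.isdigit).length = 0 := by rw [hnil]; rfl
    have hguard : ¬ (((s + ((cs.drop s).takeWhile PySem.Chars.isdigit).length : Nat) : Int) < (cs.length : Int)) := by omega
    rw [if_neg (by simp), if_neg hguard]
    rw [pvSliceNat]
    rw [show s + ((cs.drop s).takeWhile PySem.Chars.isdigit).length - s = ((cs.drop s).takeWhile PySem.Chars.isdigit).length from by omega]
    rw [pvTakeRun]
    simp
  · -- the run stops at ch
    have hposlen : 0 < ((cs.drop s).dropWhile PySem.Chars.isdigit).length := by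
      cases hR : (cs.drop s).dropWhile PySem.Chars.isdigit with
      | nil => rw [hR] at hrh; simp at hrh
      | cons a as => simp
    have hguard : (((s + ((cs.drop s).takeWhile PySem.Chars.isdigit).length : Nat) : Int) < (cs.length : Int)) := by omega
    rw [if_pos hguard, pvGetRun, hrh]
    by_cases hdot : ch = '.'
    · have hbeq : (ch == '.') = true := beq_iff_eq.mpr hdot
      simp only [hbeq, if_true]
      have hh : ((cs.drop s).dropWhile PySem.Chars.isdigit).head? = some '.' := by rw [hrh, hdot]
      rw [show ((s + ((cs.drop s).takeWhile PySem.Chars.isdigit).length : Nat) : Int) + 1 = ((s + ((cs.drop s).takeWhile PySem.Chars.isdigit).length + 1 : Nat) : Int) from by push_cast; ring]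
      rw [pvSkip_closed cs (((cs.length : Int) - ((s + ((cs.drop s).takeWhile PySem.Chars.isdigit).length + 1 : Nat) : Int)).toNat)
        (s + ((cs.drop s).takeWhile PySem.Chars.isdigit).length + 1) (by omega)]
      rw [pvDropDot]
      rw [if_pos (show some ch = some '.' from by rw [hdot])]
      rw [pvSliceNat]
      rw [show s + ((cs.drop s).takeWhile PySem.Chars.isdigit).length + 1 + (((cs.drop s).dropWhile PySem.Chars.isdigit).tail.takeWhile PySem.Chars.isdigit).length - s = ((cs.drop s).takeWhile PySem.Chars.isdigit).length + 1 + (((cs.drop s).dropWhile PySem.Chars.isdigit).tail.takeWhile PySem.Chars.isdigit).length from by omega]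
      rw [pvTakeDot (cs.drop s) hh]
      simp
    · have hbeq : (ch == '.') = false := by simp [hdot]
      simp only [hbeq]
      rw [if_neg (show ¬ (false = true) from by simp)]
      rw [if_neg (show ¬ (some ch = some '.') from by simp [hdot])]
      rw [pvSliceNat]
      rw [show s + ((cs.drop s).takeWhile PySem.Chars.isdigit).length - s = ((cs.drop s).takeWhile PySem.Chars.isdigit).length from by omega]
      rw [pvTakeRun]
      simp

-- main equivalence, negative start inside Pre_ and outside D_
lemma pvMain_neg (sql : String) (start : Int) (hneg : start < 0)
    (hpre : -(sql.toList.length : Int) ≤ start)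
    (hnc : ¬ ((sql.toList.drop (((sql.toList.length : Int) + start).toNat)).all pvNumLike = true ∧
              (sql.toList.drop (((sql.toList.length : Int) + start).toNat)).count '.' ≤ 1)) :
    scan_number_py sql start = scan_number_py_alt sql start := by
  simp only [scan_number_py, scan_number_py_alt, pvLen]
  set cs := sql.toList with hcs
  set s : Nat := ((cs.length : Int) + start).toNat with hsdef
  have hslt : s < cs.length := by omega
  have hstart : start = ((s : Nat) : Int) - (cs.length : Int) := by omega
  rw [hstart]
  have hend := pvEndLt cs s hslt hnc
  have hsum := pvSum (cs.drop s)
  have hlen : (cs.drop s).length = cs.length - s := List.length_drop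
  set fuel := ((cs.length : Int) - (((s : Nat) : Int) - (cs.length : Int))).toNat with hfueldef
  have hfl : cs.length ≤ s + fuel := by omega
  have hL1lt : s + ((cs.drop s).takeWhile PySem.Chars.isdigit).length < cs.length := by
    split_ifs at hend <;> omega
  have hA' := pvScanA_false_closed cs fuel s [] hfl
  have hstopA : (scanALoop cs (cs.length : Int) fuel ((cs.length : Int) + (((s : Nat) : Int) - (cs.length : Int))) false []).2
      < (cs.length : Int) := by
    rw [show (cs.length : Int) + (((s : Nat) : Int) - (cs.length : Int)) = ((s : Nat) : Int) from by ring, hA']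
    split_ifs at hend ⊢ <;> (simp only []; omega)
  have hAL := pvScanA_shift cs fuel (((s : Nat) : Int) - (cs.length : Int)) false [] (by omega) (by omega) hstopA
  rw [hAL, show (cs.length : Int) + (((s : Nat) : Int) - (cs.length : Int)) = ((s : Nat) : Int) from by ring, hA']
  have hskipCF := pvSkip_closed cs fuel s hfl
  have hstopS : skipDigits cs (cs.length : Int) fuel ((cs.length : Int) + (((s : Nat) : Int) - (cs.length : Int)))
      < (cs.length : Int) := by
    rw [show (cs.length : Int) + (((s : Nat) : Int) - (cs.length : Int)) = ((s : Nat) : Int) from by ring, hskipCF]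
    exact_mod_cast hL1lt
  have hSL := pvSkip_shift cs fuel (((s : Nat) : Int) - (cs.length : Int)) (by omega) (by omega) hstopS
  rw [hSL, show (cs.length : Int) + (((s : Nat) : Int) - (cs.length : Int)) = ((s : Nat) : Int) from by ring, hskipCF]
  have hguard : (((s + ((cs.drop s).takeWhile PySem.Chars.isdigit).length : Nat) : Int) - (cs.length : Int)) < (cs.length : Int) := by omega
  rw [if_pos hguard]
  have hget : PySem.List.pyGet? cs (((s + ((cs.drop s).takeWhile PySem.Chars.isdigit).length : Nat) : Int) - (cs.length : Int))
      = ((cs.drop s).dropWhile PySem.Chars.isdigit).head? := by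
    rw [pvGet_shift cs _ (by omega) (by omega)]
    rw [show (cs.length : Int) + (((s + ((cs.drop s).takeWhile PySem.Chars.isdigit).length : Nat) : Int) - (cs.length : Int))
        = ((s + ((cs.drop s).takeWhile PySem.Chars.isdigit).length : Nat) : Int) from by ring]
    exact pvGetRun cs s
  rw [hget]
  rcases hrh : ((cs.drop s).dropWhile PySem.Chars.isdigit).head? with _ | ch
  · -- impossible: the digit run would have consumed the whole suffix
    exfalso
    have hnil : (cs.drop s).dropWhile PySem.Chars.isdigit = [] := by
      cases hR : (cs.drop s).dropWhile PySem.Chars.isdigit with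
      | nil => rfl
      | cons a as => rw [hR] at hrh; simp at hrh
    have hz : ((cs.drop s).dropWhile PySem.Chars.isdigit).length = 0 := by rw [hnil]; rfl
    omega
  · by_cases hdot : ch = '.'
    · have hbeq : (ch == '.') = true := beq_iff_eq.mpr hdot
      simp only [hbeq, if_true]
      have hh : ((cs.drop s).dropWhile PySem.Chars.isdigit).head? = some '.' := by rw [hrh, hdot]
      have hend2 : s + ((cs.drop s).takeWhile PySem.Chars.isdigit).length + 1 + (((cs.drop s).dropWhile PySem.Chars.isdigit).tail.takeWhile PySem.Chars.isdigit).length < cs.length := by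
        rw [if_pos hh] at hend
        exact hend
      rw [show ((s + ((cs.drop s).takeWhile PySem.Chars.isdigit).length : Nat) : Int) - (cs.length : Int) + 1
          = ((s + ((cs.drop s).takeWhile PySem.Chars.isdigit).length + 1 : Nat) : Int) - (cs.length : Int) from by push_cast; ring]
      set fuel2 := ((cs.length : Int) - (((s + ((cs.drop s).takeWhile PySem.Chars.isdigit).length + 1 : Nat) : Int) - (cs.length : Int))).toNat
        with hfuel2def
      have hfl2 : cs.length ≤ (s + ((cs.drop s).takeWhile PySem.Chars.isdigit).length + 1) + fuel2 := by omega
      have hstop2 : skipDigits cs (cs.length : Int) fuel2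
          ((cs.length : Int) + (((s + ((cs.drop s).takeWhile PySem.Chars.isdigit).length + 1 : Nat) : Int) - (cs.length : Int)))
          < (cs.length : Int) := by
        rw [show (cs.length : Int) + (((s + ((cs.drop s).takeWhile PySem.Chars.isdigit).length + 1 : Nat) : Int) - (cs.length : Int))
            = ((s + ((cs.drop s).takeWhile PySem.Chars.isdigit).length + 1 : Nat) : Int) from by ring]
        rw [pvSkip_closed cs fuel2 (s + ((cs.drop s).takeWhile PySem.Chars.isdigit).length + 1) hfl2, pvDropDot]
        exact_mod_cast hend2
      have hS2 := pvSkip_shift cs fuel2 (((s + ((cs.drop s).takeWhile PySem.Chars.isdigit).length + 1 : Nat) : Int) - (cs.length : Int))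
        (by omega) (by omega) hstop2
      rw [hS2]
      rw [show (cs.length : Int) + (((s + ((cs.drop s).takeWhile PySem.Chars.isdigit).length + 1 : Nat) : Int) - (cs.length : Int))
          = ((s + ((cs.drop s).takeWhile PySem.Chars.isdigit).length + 1 : Nat) : Int) from by ring]
      rw [pvSkip_closed cs fuel2 (s + ((cs.drop s).takeWhile PySem.Chars.isdigit).length + 1) hfl2, pvDropDot]
      rw [if_pos (show some ch = some '.' from by rw [hdot])]
      rw [pvSliceNegNeg cs s (s + ((cs.drop s).takeWhile PySem.Chars.isdigit).length + 1 + (((cs.drop s).dropWhile PySem.Chars.isdigit).tail.takeWhile PySem.Chars.isdigit).length) hslt (by omega)]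
      rw [show s + ((cs.drop s).takeWhile PySem.Chars.isdigit).length + 1 + (((cs.drop s).dropWhile PySem.Chars.isdigit).tail.takeWhile PySem.Chars.isdigit).length - s = ((cs.drop s).takeWhile PySem.Chars.isdigit).length + 1 + (((cs.drop s).dropWhile PySem.Chars.isdigit).tail.takeWhile PySem.Chars.isdigit).length from by omega]
      rw [pvTakeDot (cs.drop s) hh]
      simp
    · have hbeq : (ch == '.') = false := by simp [hdot]
      simp only [hbeq]
      rw [if_neg (show ¬ (false = true) from by simp)]
      rw [if_neg (show ¬ (some ch = some '.') from by simp [hdot])]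
      rw [pvSliceNegNeg cs s (s + ((cs.drop s).takeWhile PySem.Chars.isdigit).length) hslt hL1lt]
      rw [show s + ((cs.drop s).takeWhile PySem.Chars.isdigit).length - s = ((cs.drop s).takeWhile PySem.Chars.isdigit).length from by omega]
      rw [pvTakeRun]
      simp


-- the loop index never decreases
lemma pvA2_mono (cs : List Char) (n : Int) : ∀ (fuel : Nat) (i : Int) (hd : Bool) (buf : List Char),
    i ≤ (scanALoop cs n fuel i hd buf).2 := by
  intro fuel
  induction fuel with
  | zero => intro i hd buf; simp [scanALoop]
  | succ fuel ih =>
    intro i hd buf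
    rw [scanALoop]
    by_cases hg : i < n
    · simp only [hg, if_true]
      cases hv : PySem.List.pyGet? cs i with
      | none => simp
      | some ch =>
        by_cases hdig : PySem.Chars.isdigit ch
        · simp only [hdig, if_true]
          exact le_trans (by omega) (ih (i + 1) hd (buf ++ [ch]))
        · simp only [hdig]
          by_cases hdot : (ch == '.' && !hd) = true
          · simp only [hdot, if_true]
            exact le_trans (by omega) (ih (i + 1) true (buf ++ [ch]))
          · simp only [hdot]
            simp
    · simp [hg]

-- one character is appended per consumed index
lemma pvA1_len (cs : List Char) (n : Int) : ∀ (fuel : Nat) (i : Int) (hd : Bool) (buf : List Char),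
    (((scanALoop cs n fuel i hd buf).1.length : Int))
      = (buf.length : Int) + ((scanALoop cs n fuel i hd buf).2 - i) := by
  intro fuel
  induction fuel with
  | zero => intro i hd buf; simp [scanALoop]
  | succ fuel ih =>
    intro i hd buf
    rw [scanALoop]
    by_cases hg : i < n
    · simp only [hg, if_true]
      cases hv : PySem.List.pyGet? cs i with
      | none => simp
      | some ch =>
        by_cases hdig : PySem.Chars.isdigit ch
        · simp only [hdig, if_true]
          have h := ih (i + 1) hd (buf ++ [ch])
          simp only [List.length_append, List.length_cons, List.length_nil] at h
          omega
        · simp only [hdig, Bool.false_eq_true, if_false]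
          by_cases hdot : (ch == '.' && !hd) = true
          · rw [if_pos hdot]
            have h := ih (i + 1) true (buf ++ [ch])
            simp only [List.length_append, List.length_cons, List.length_nil] at h
            omega
          · rw [if_neg hdot]
            simp
    · simp [hg]

-- on a fully numeric suffix the scan crosses index 0 (Python wraparound region)
lemma pvCross (cs : List Char) : ∀ (fuel : Nat) (i : Int) (hd : Bool) (buf : List Char),
    -(cs.length : Int) ≤ i → i < 0 → (-i).toNat ≤ fuel →
    (cs.drop ((cs.length : Int) + i).toNat).all pvNumLike = true →
    (hd = true → (cs.drop ((cs.length : Int) + i).toNat).count '.' = 0) →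
    (hd = false → (cs.drop ((cs.length : Int) + i).toNat).count '.' ≤ 1) →
    0 ≤ (scanALoop cs (cs.length : Int) fuel i hd buf).2 := by
  intro fuel
  induction fuel with
  | zero => intro i hd buf h1 h2 h3 _ _ _; omega
  | succ fuel ih =>
    intro i hd buf h1 h2 h3 hall hc1 hc0
    have ht : ((cs.length : Int) + i).toNat < cs.length := by omega
    have hteq : (((cs.length : Int) + i).toNat + 1) = ((cs.length : Int) + (i + 1)).toNat := by omega
    have hdropt : cs.drop ((cs.length : Int) + i).toNat
        = cs[((cs.length : Int) + i).toNat] :: cs.drop (((cs.length : Int) + i).toNat + 1) :=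
      List.drop_eq_getElem_cons ht
    have hget : PySem.List.pyGet? cs i = some cs[((cs.length : Int) + i).toNat] := by
      rw [pvGet_shift cs i h1 h2]
      exact PySem.List.pyGet?_eq_some_getElem _ (by omega) (by omega)
    have hg : i < (cs.length : Int) := by omega
    have hnum : pvNumLike cs[((cs.length : Int) + i).toNat] = true := by
      refine List.all_eq_true.mp hall _ ?_
      rw [hdropt]; exact List.mem_cons_self
    rw [hdropt, List.all_cons] at hall
    have hall' := (Bool.and_eq_true_iff.mp hall).2
    rw [hdropt, List.count_cons] at hc1 hc0
    rw [scanALoop]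
    simp only [hg, if_true, hget]
    rw [hteq] at hall' hc1 hc0
    by_cases hdig : PySem.Chars.isdigit cs[((cs.length : Int) + i).toNat]
    · have hne : (cs[((cs.length : Int) + i).toNat] == '.') = false := by
        cases hb : (cs[((cs.length : Int) + i).toNat] == '.') with
        | false => rfl
        | true =>
          have := beq_iff_eq.mp hb
          rw [this] at hdig
          simp [PySem.Chars.isdigit] at hdig
      simp only [hdig, if_true]
      simp only [hne, Bool.false_eq_true, if_false, Nat.add_zero] at hc1 hc0
      by_cases hz : i + 1 = 0
      · rw [hz]; exact pvA2_mono cs (cs.length : Int) fuel 0 hd (buf ++ [cs[((cs.length : Int) + i).toNat]])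
      · exact ih (i + 1) hd _ (by omega) (by omega) (by omega) hall' hc1 hc0
    · have hdot : (cs[((cs.length : Int) + i).toNat] == '.') = true := by
        simp only [pvNumLike, Bool.or_eq_true] at hnum
        rcases hnum with h | h
        · exact absurd h hdig
        · exact h
      rw [if_pos hdot] at hc1 hc0
      cases hd with
      | true =>
        exfalso
        have := hc1 rfl
        omega
      | false =>
        simp only [hdig, hdot, Bool.not_false, Bool.and_true, if_true]
        have hc0' := hc0 rfl
        by_cases hz : i + 1 = 0
        · rw [hz]; exact pvA2_mono cs (cs.length : Int) fuel 0 true (buf ++ [cs[((cs.length : Int) + i).toNat]])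
        · refine ih (i + 1) true _ (by omega) (by omega) (by omega) hall' (fun _ => by omega) (by simp)

theorem scan_number_py_spec : Claim_unchanged_scan_number_py := by
  intro sql start _ hpre hnd
  by_cases h0 : 0 ≤ start
  · exact pvMain_nonneg sql start h0
  · have h0' : start < 0 := by omega
    refine pvMain_neg sql start h0' hpre ?_
    intro hc
    exact hnd ⟨h0', hpre, hc.1, hc.2⟩

theorem scan_number_py_changed : Claim_changed_scan_number_py := by
  unfold Claim_changed_scan_number_py; decide

theorem scan_number_py_tight : Claim_exact_scan_number_py := by
  intro sql start _ hpre hD heq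
  obtain ⟨hneg, hpre', hall, hcnt⟩ := hD
  simp only [scan_number_py, scan_number_py_alt, pvLen] at heq
  set cs := sql.toList with hcs
  have hcross := pvCross cs (((cs.length : Int) - start).toNat) start false []
    hpre' hneg (by omega) hall (by simp) (fun _ => hcnt)
  have hlenA := pvA1_len cs (cs.length : Int) (((cs.length : Int) - start).toNat) start false []
  obtain ⟨h1, h2⟩ := Prod.ext_iff.mp heq
  simp only at h1 h2
  have h1' := congrArg String.toList h1
  simp only [String.toList_ofList] at h1'
  have h1len := congrArg List.length h1'
  rw [PySem.List.length_slice] at h1len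
  rw [← h2] at h1len
  have hcB : PySem.List.clampIdx cs.length start = ((cs.length : Int) + start).toNat := by
    unfold PySem.List.clampIdx
    rw [if_pos hneg, if_neg (by omega)]
  have hcE : PySem.List.clampIdx cs.length
      ((scanALoop cs (cs.length : Int) (((cs.length : Int) - start).toNat) start false []).2)
      = min ((scanALoop cs (cs.length : Int) (((cs.length : Int) - start).toNat) start false []).2).toNat
          cs.length := by
    unfold PySem.List.clampIdx
    rw [if_neg (by omega)]
  rw [hcB, hcE] at h1len
  simp only [List.length_nil] at hlenA
  omega
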